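-- pv_equiv track=rewrite | github.com/seanxiaoxiao/leetcode-python | problem505.py | destinationAndDistance
-- ===== SOURCE A (Python) =====
-- from typing import List
--
-- def destinationAndDistance(maze: List[List[int]], i, j, direction):
--     if direction == 0:
--         for index in reversed(range(-1, i)):
--             if index == -1:
--                 return [0, j, i]
--             elif maze[index][j] == 1:
--                 return [index + 1, j, i - index - 1]
--     elif direction == 1:
--         for index in range(i + 1, len(maze) + 1):
--             if index == len(maze):
--                 return [len(maze) - 1, j, len(maze) - i - 1]
--             elif maze[index][j] == 1:
--                 return [index - 1, j, index - i - 1]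
--     elif direction == 2:
--         for index in reversed(range(-1, j)):
--             if index == -1:
--                 return [i, 0, j]
--             elif maze[i][index] == 1:
--                 return [i, index + 1, j - index - 1]
--     elif direction == 3:
--         for index in range(j + 1, len(maze[0]) + 1):
--             if index == len(maze[0]):
--                 return [i, len(maze[0]) - 1, len(maze[0]) - j - 1]
--             elif maze[i][index] == 1:
--                 return [i, index - 1, index - j - 1]
-- ===== SOURCE B (Python) =====
-- def destinationAndDistance(maze, i, j, direction):
--     if direction in (0, 1):
--         line, pos = [row[j] for row in maze], i
--     elif direction in (2, 3):
--         line, pos = maze[i], j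
--     else:
--         return None
--     if direction in (0, 2):
--         walls = [k for k in range(pos) if line[k] == 1]
--         stop = max(walls) + 1 if walls else 0
--     else:
--         walls = [k for k in range(pos + 1, len(line)) if line[k] == 1]
--         stop = min(walls) - 1 if walls else len(line) - 1
--     dist = abs(stop - pos)
--     return [stop, j, dist] if direction in (0, 1) else [i, stop, dist]
-- ===== Notes on version B (the rewrite author's own statement) =====
-- stated objective: alternative
-- what changed: B replaces A's four early-exit scans toward the first wall by extracting the whole row/column once, collecting ALL wall indices on the relevant side with a comprehension, and deriving the stop cell by max/min aggregation plus abs for the distance.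
-- outside the precondition, e.g. on destinationAndDistance([[0], [1], [0]], 1, -1, 2): A returns None, B returns [1, 0, 1]; on destinationAndDistance([[0], [0], [0]], -1, 4, 0): A returns None, B raises IndexError
import Mathlib
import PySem

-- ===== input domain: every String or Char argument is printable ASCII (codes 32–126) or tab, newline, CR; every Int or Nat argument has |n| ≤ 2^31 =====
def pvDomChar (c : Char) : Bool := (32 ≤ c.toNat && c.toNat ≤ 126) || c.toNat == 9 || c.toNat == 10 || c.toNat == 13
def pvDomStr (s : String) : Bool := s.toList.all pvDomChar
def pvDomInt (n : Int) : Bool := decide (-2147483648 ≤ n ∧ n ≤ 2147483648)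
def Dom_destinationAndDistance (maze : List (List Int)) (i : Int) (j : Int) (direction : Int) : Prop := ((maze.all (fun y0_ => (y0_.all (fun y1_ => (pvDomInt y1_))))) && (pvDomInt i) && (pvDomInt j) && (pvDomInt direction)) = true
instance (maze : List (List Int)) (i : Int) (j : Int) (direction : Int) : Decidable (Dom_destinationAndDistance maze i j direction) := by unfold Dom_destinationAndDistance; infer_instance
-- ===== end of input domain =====

-- B replaces A's four early-exit scans by extracting the whole row/column, collecting all
-- wall indices on the relevant side, and deriving the stop cell by max/min aggregation
-- (objective: alternative; same asymptotic cost).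

-- ===== PORT A =====

-- maze[r][c]; none = IndexError (excluded by Pre_)
def pvCell (maze : List (List Int)) (r c : Int) : Option Int :=
  match PySem.List.pyGet? maze r with
  | none => none
  | some row => PySem.List.pyGet? row c

-- 'for index in reversed(range(-1, i))' body of A's direction-0 branch (falls through → none)
def pvLoopUp (maze : List (List Int)) (i j : Int) : List Int → Option (List Int)
  | [] => none
  | idx :: rest =>
    if idx = -1 then some [0, j, i]
    else
      match pvCell maze idx j with
      | none => none
      | some v => if v = 1 then some [idx + 1, j, i - idx - 1] else pvLoopUp maze i j rest

-- 'for index in range(i + 1, len(maze) + 1)' body of A's direction-1 branch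
def pvLoopDown (maze : List (List Int)) (i j : Int) : List Int → Option (List Int)
  | [] => none
  | idx :: rest =>
    if idx = (maze.length : Int) then
      some [(maze.length : Int) - 1, j, (maze.length : Int) - i - 1]
    else
      match pvCell maze idx j with
      | none => none
      | some v => if v = 1 then some [idx - 1, j, idx - i - 1] else pvLoopDown maze i j rest

-- 'for index in reversed(range(-1, j))' body of A's direction-2 branch
def pvLoopLeft (maze : List (List Int)) (i j : Int) : List Int → Option (List Int)
  | [] => none
  | idx :: rest =>
    if idx = -1 then some [i, 0, j]
    else
      match pvCell maze i idx with
      | none => none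
      | some v => if v = 1 then some [i, idx + 1, j - idx - 1] else pvLoopLeft maze i j rest

-- 'for index in range(j + 1, len(maze[0]) + 1)' body of A's direction-3 branch
def pvLoopRight (maze : List (List Int)) (i j cols : Int) : List Int → Option (List Int)
  | [] => none
  | idx :: rest =>
    if idx = cols then some [i, cols - 1, cols - j - 1]
    else
      match pvCell maze i idx with
      | none => none
      | some v => if v = 1 then some [i, idx - 1, idx - j - 1] else pvLoopRight maze i j cols rest

def destinationAndDistance (maze : List (List Int)) (i : Int) (j : Int) (direction : Int) : Option (List Int) :=
  if direction = 0 then pvLoopUp maze i j ((PySem.List.pyRange (-1) i 1).reverse)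
  else if direction = 1 then pvLoopDown maze i j (PySem.List.pyRange (i + 1) ((maze.length : Int) + 1) 1)
  else if direction = 2 then pvLoopLeft maze i j ((PySem.List.pyRange (-1) j 1).reverse)
  else if direction = 3 then
    match PySem.List.pyGet? maze 0 with
    | none => none  -- len(maze[0]) raises IndexError on an empty maze (excluded by Pre_)
    | some row0 => pvLoopRight maze i j (row0.length : Int)
        (PySem.List.pyRange (j + 1) ((row0.length : Int) + 1) 1)
  else none

-- ===== PORT B =====

-- 'max(walls) + 1 if walls else 0'
def pvStopBack (walls : List Int) : Int :=
  match PySem.List.max? walls (fun x => x) with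
  | some m => m + 1
  | none => 0

-- 'min(walls) - 1 if walls else len(line) - 1'
def pvStopFwd (len : Int) (walls : List Int) : Int :=
  match PySem.List.min? walls (fun x => x) with
  | some m => m - 1
  | none => len - 1

def destinationAndDistance_alt (maze : List (List Int)) (i : Int) (j : Int) (direction : Int) : Option (List Int) :=
  match (if direction = 0 ∨ direction = 1 then
           -- line = [row[j] for row in maze] (none = IndexError on a short row, excluded by Pre_)
           (maze.mapM (fun row => PySem.List.pyGet? row j)).map (fun l => (l, i))
         else if direction = 2 ∨ direction = 3 then
           -- line = maze[i]
           (PySem.List.pyGet? maze i).map (fun l => (l, j))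
         else none) with
  | none => none
  | some (line, pos) =>
    let stop : Int :=
      if direction = 0 ∨ direction = 2 then
        pvStopBack ((PySem.List.pyRange 0 pos 1).filter
          (fun k => PySem.List.pyGet? line k == some 1))
      else
        pvStopFwd (line.length : Int) ((PySem.List.pyRange (pos + 1) ((line.length : Int)) 1).filter
          (fun k => PySem.List.pyGet? line k == some 1))
    if direction = 0 ∨ direction = 1 then some [stop, j, |stop - pos|]
    else some [i, stop, |stop - pos|]

-- ===== PRECONDITION & SPEC =====
-- Pre_ excludes, for the four real directions only, inputs outside the natural maze domain:
-- empty or ragged mazes and out-of-range or negative coordinates, on which A's values (or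
-- exceptions) come from Python negative-index wraparound, IndexError, or falling off the loop.
def Pre_destinationAndDistance (maze : List (List Int)) (i : Int) (j : Int) (direction : Int) : Prop :=
  (direction = 0 ∨ direction = 1 ∨ direction = 2 ∨ direction = 3) →
    (maze ≠ [] ∧ (∀ r ∈ maze, r.length = (maze.headD []).length) ∧
     0 ≤ i ∧ i < (maze.length : Int) ∧ 0 ≤ j ∧ j < ((maze.headD []).length : Int))
instance (maze : List (List Int)) (i : Int) (j : Int) (direction : Int) : Decidable (Pre_destinationAndDistance maze i j direction) := by unfold Pre_destinationAndDistance; infer_instance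

def pvWitness_destinationAndDistance : List (List Int) × Int × Int × Int := ([[0, 0], [1, 0]], 1, 1, 0)

def Spec_destinationAndDistance (maze : List (List Int)) (i : Int) (j : Int) (direction : Int) (out : Option (List Int)) : Prop := out = destinationAndDistance_alt maze i j direction
instance (maze : List (List Int)) (i : Int) (j : Int) (direction : Int) (out : Option (List Int)) : Decidable (Spec_destinationAndDistance maze i j direction out) := by unfold Spec_destinationAndDistance; infer_instance

-- ===== CLAIM (what is proved, stated in full; the proofs are below) =====
def Claim_equal_destinationAndDistance : Prop := ∀ (maze : List (List Int)) (i : Int) (j : Int) (direction : Int), Dom_destinationAndDistance maze i j direction → Pre_destinationAndDistance maze i j direction → Spec_destinationAndDistance maze i j direction (destinationAndDistance maze i j direction)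

-- ===== LEMMAS AND PROOFS =====

lemma row_get (row : List Int) (j : Int) (hj0 : 0 ≤ j) (hj : j < (row.length : Int)) :
    PySem.List.pyGet? row j = some (PySem.List.pyGetD row j 0) := by
  rw [PySem.List.pyGet?_of_nonneg row hj0,
      List.getElem?_eq_getElem (show j.toNat < row.length by omega),
      PySem.List.pyGetD_eq_getElem row 0 hj0 hj]

lemma mapM_some {α β : Type} (f : α → Option β) (g : α → β) :
    ∀ l : List α, (∀ a ∈ l, f a = some (g a)) → l.mapM f = some (l.map g) := by
  intro l
  induction l with
  | nil => intro _; rfl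
  | cons a t ih =>
    intro h
    rw [List.map_cons, List.mapM_cons, h a (by simp), ih (fun x hx => h x (by simp [hx]))]
    rfl

lemma col_spec (maze : List (List Int)) (j : Int) (cols : Nat)
    (rect : ∀ r ∈ maze, r.length = cols) (hj0 : 0 ≤ j) (hj : j < (cols : Int)) :
    ∀ r : Int, 0 ≤ r → r < (maze.length : Int) →
      PySem.List.pyGet? (maze.map (fun row => PySem.List.pyGetD row j 0)) r = pvCell maze r j := by
  intro r hr0 hr
  have hrN : r.toNat < maze.length := by omega
  rw [PySem.List.pyGet?_of_nonneg _ hr0]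
  unfold pvCell
  rw [PySem.List.pyGet?_of_nonneg maze hr0, List.getElem?_eq_getElem hrN]
  have hrm : r.toNat < (maze.map (fun row => PySem.List.pyGetD row j 0)).length := by
    simpa using hrN
  rw [List.getElem?_eq_getElem hrm]
  have hlen := rect _ (List.getElem_mem hrN)
  simp only [List.getElem_map]
  exact (row_get maze[r.toNat] j hj0 (by omega)).symm

lemma line_some (line : List Int) (k : Int) (hk0 : 0 ≤ k) (hk : k < (line.length : Int)) :
    ∃ v, PySem.List.pyGet? line k = some v :=
  ⟨_, row_get line k hk0 hk⟩

lemma filter_walls_nil (line : List Int) (a b : Int)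
    (h : ∀ k : Int, a ≤ k → k < b → ¬ PySem.List.pyGet? line k = some 1) :
    (PySem.List.pyRange a b 1).filter (fun k => PySem.List.pyGet? line k == some 1) = [] := by
  rw [List.filter_eq_nil_iff]
  intro k hk
  rw [PySem.List.mem_pyRange_one] at hk
  simpa using h k hk.1 hk.2

lemma max?_append_singleton (ws : List Int) (p : Int) (h : ∀ x ∈ ws, x ≤ p) :
    PySem.List.max? (ws ++ [p]) (fun x => x) = some p := by
  cases ws with
  | nil => rw [List.nil_append, PySem.List.max?_id_cons]; rfl
  | cons w t =>
    rw [List.cons_append, PySem.List.max?_id_cons]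
    congr 1
    rw [List.foldl_append, List.foldl_cons, List.foldl_nil]
    have hle : t.foldl max w ≤ p := by
      rcases PySem.List.foldl_max_mem t w with hm | hm
      · rw [hm]; exact h w (by simp)
      · exact h _ (by simp [hm])
    exact max_eq_right hle

lemma min?_cons_of_min (t : List Int) (p : Int) (h : ∀ x ∈ t, p ≤ x) :
    PySem.List.min? (p :: t) (fun x => x) = some p := by
  rw [PySem.List.min?_id_cons]
  congr 1
  rcases PySem.List.foldl_min_mem t p with hm | hm
  · exact hm
  · have h1 := (PySem.List.foldl_min_le t p).1
    have h2 := h _ hm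
    omega

lemma pvStopBack_nil : pvStopBack [] = 0 := rfl

lemma pvStopFwd_nil (len : Int) : pvStopFwd len [] = len - 1 := rfl

lemma pvStopBack_append (ws : List Int) (p : Int) (h : ∀ x ∈ ws, x ≤ p) :
    pvStopBack (ws ++ [p]) = p + 1 := by
  unfold pvStopBack; rw [max?_append_singleton ws p h]

lemma pvStopFwd_cons (len p : Int) (t : List Int) (h : ∀ x ∈ t, p ≤ x) :
    pvStopFwd len (p :: t) = p - 1 := by
  unfold pvStopFwd; rw [min?_cons_of_min t p h]

-- ===== per-direction bridges =====

lemma upEq (maze : List (List Int)) (i j : Int) (line : List Int)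
    (hlen : line.length = maze.length)
    (hline : ∀ r : Int, 0 ≤ r → r < (maze.length : Int) → PySem.List.pyGet? line r = pvCell maze r j)
    (hi0 : 0 ≤ i) (hi : i < (maze.length : Int)) :
    ∀ p : Nat, (p : Int) ≤ i →
      (∀ k : Int, (p : Int) ≤ k → k < i → pvCell maze k j ≠ some 1) →
      pvLoopUp maze i j ((PySem.List.pyRange (-1) (p : Int) 1).reverse)
        = some [pvStopBack ((PySem.List.pyRange 0 i 1).filter (fun k => PySem.List.pyGet? line k == some 1)), j,
                |pvStopBack ((PySem.List.pyRange 0 i 1).filter (fun k => PySem.List.pyGet? line k == some 1)) - i|] := by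
  intro p
  induction p with
  | zero =>
    intro _ hnw
    have hw : (PySem.List.pyRange 0 i 1).filter (fun k => PySem.List.pyGet? line k == some 1) = [] :=
      filter_walls_nil line 0 i (fun k hk0 hki h =>
        hnw k hk0 hki ((hline k hk0 (by omega)) ▸ h))
    rw [hw, pvStopBack_nil]
    simp only [Nat.cast_zero]
    rw [show PySem.List.pyRange (-1) 0 1 = [-1] by decide]
    simp only [List.reverse_cons, List.reverse_nil, List.nil_append, pvLoopUp]
    rw [zero_sub, abs_neg, abs_of_nonneg hi0]
    simp
  | succ p ih =>
    intro hle hnw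
    have hcast : ((p + 1 : Nat) : Int) = (p : Int) + 1 := by push_cast; ring
    rw [hcast] at hle hnw ⊢
    rw [PySem.List.pyRange_one_succ_right (by omega : (-1 : Int) ≤ (p : Int)), List.reverse_append]
    simp only [List.reverse_cons, List.reverse_nil, List.nil_append, List.cons_append]
    obtain ⟨v, hv⟩ := line_some line p (by omega) (by rw [hlen]; omega)
    have hcv : pvCell maze (p : Int) j = some v := (hline p (by omega) (by omega)) ▸ hv
    simp only [pvLoopUp]
    rw [if_neg (by omega : ¬ ((p : Int) = -1)), hcv]
    by_cases h1 : v = 1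
    · subst h1
      simp only [reduceIte]
      have hs1 : PySem.List.pyRange 0 i 1
          = (PySem.List.pyRange 0 (p : Int) 1 ++ [(p : Int)]) ++ PySem.List.pyRange ((p : Int) + 1) i 1 := by
        rw [← PySem.List.pyRange_one_succ_right (by omega : (0 : Int) ≤ (p : Int)),
            ← PySem.List.pyRange_one_append 0 ((p : Int) + 1) i (by omega) (by omega)]
      rw [hs1, List.filter_append, List.filter_append]
      have htail : (PySem.List.pyRange ((p : Int) + 1) i 1).filter (fun k => PySem.List.pyGet? line k == some 1) = [] :=
        filter_walls_nil line _ _ (fun k hk0 hki h =>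
          hnw k (by omega) hki ((hline k (by omega) (by omega)) ▸ h))
      have hmid : ([(p : Int)]).filter (fun k => PySem.List.pyGet? line k == some 1) = [(p : Int)] := by
        simp [hv]
      rw [htail, hmid, List.append_nil]
      have hws : ∀ x ∈ (PySem.List.pyRange 0 (p : Int) 1).filter (fun k => PySem.List.pyGet? line k == some 1), x ≤ (p : Int) := by
        intro x hx
        have hx2 := List.mem_of_mem_filter hx
        rw [PySem.List.mem_pyRange_one] at hx2
        omega
      rw [pvStopBack_append _ _ hws]
      rw [show |(p : Int) + 1 - i| = i - (p : Int) - 1 by rw [abs_of_nonpos (by omega)]; ring]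
    · simp only [if_neg h1]
      refine ih (by omega) (fun k hk0 hki hcell => ?_)
      by_cases hkp : k = (p : Int)
      · rw [hkp, hcv] at hcell
        exact h1 (Option.some.inj hcell)
      · exact hnw k (by omega) hki hcell

lemma downEq (maze : List (List Int)) (i j : Int) (line : List Int)
    (hlen : line.length = maze.length)
    (hline : ∀ r : Int, 0 ≤ r → r < (maze.length : Int) → PySem.List.pyGet? line r = pvCell maze r j)
    (hi0 : 0 ≤ i) :
    ∀ n : Nat, ∀ p : Int, i ≤ p → p + (n : Int) = (maze.length : Int) - 1 →
      (∀ k : Int, i < k → k ≤ p → pvCell maze k j ≠ some 1) →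
      pvLoopDown maze i j (PySem.List.pyRange (p + 1) ((maze.length : Int) + 1) 1)
        = some [pvStopFwd (line.length : Int) ((PySem.List.pyRange (i + 1) ((line.length : Int)) 1).filter (fun k => PySem.List.pyGet? line k == some 1)), j,
                |pvStopFwd (line.length : Int) ((PySem.List.pyRange (i + 1) ((line.length : Int)) 1).filter (fun k => PySem.List.pyGet? line k == some 1)) - i|] := by
  have hL : (line.length : Int) = (maze.length : Int) := by rw [hlen]
  intro n
  induction n with
  | zero =>
    intro p hip hpn hnw
    simp only [Nat.cast_zero, add_zero] at hpn
    have hw : (PySem.List.pyRange (i + 1) ((line.length : Int)) 1).filter (fun k => PySem.List.pyGet? line k == some 1) = [] :=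
      filter_walls_nil line _ _ (fun k hk0 hki h =>
        hnw k (by omega) (by omega) ((hline k (by omega) (by omega)) ▸ h))
    rw [hw, pvStopFwd_nil]
    rw [PySem.List.pyRange_one_cons (by omega : p + 1 < (maze.length : Int) + 1),
        PySem.List.pyRange_one_eq_nil (by omega : (maze.length : Int) + 1 ≤ p + 1 + 1)]
    simp only [pvLoopDown]
    rw [if_pos (by omega : p + 1 = (maze.length : Int)), hL]
    rw [show |(maze.length : Int) - 1 - i| = (maze.length : Int) - i - 1 by
      rw [abs_of_nonneg (by omega)]; ring]
  | succ n ih =>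
    intro p hip hpn hnw
    have hcast : ((n + 1 : Nat) : Int) = (n : Int) + 1 := by push_cast; ring
    rw [hcast] at hpn
    rw [PySem.List.pyRange_one_cons (by omega : p + 1 < (maze.length : Int) + 1)]
    simp only [pvLoopDown]
    rw [if_neg (by omega : ¬ (p + 1 = (maze.length : Int)))]
    obtain ⟨v, hv⟩ := line_some line (p + 1) (by omega) (by omega)
    have hcv : pvCell maze (p + 1) j = some v := (hline (p + 1) (by omega) (by omega)) ▸ hv
    rw [hcv]
    by_cases h1 : v = 1
    · subst h1
      simp only [reduceIte]
      rw [PySem.List.pyRange_one_append (i + 1) (p + 1) ((line.length : Int)) (by omega) (by omega),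
          List.filter_append]
      have h0 : (PySem.List.pyRange (i + 1) (p + 1) 1).filter (fun k => PySem.List.pyGet? line k == some 1) = [] :=
        filter_walls_nil line _ _ (fun k hk0 hki h =>
          hnw k (by omega) (by omega) ((hline k (by omega) (by omega)) ▸ h))
      rw [h0, List.nil_append,
          PySem.List.pyRange_one_cons (by omega : p + 1 < (line.length : Int)),
          List.filter_cons_of_pos (by simp [hv])]
      have hmin : ∀ x ∈ (PySem.List.pyRange (p + 1 + 1) ((line.length : Int)) 1).filter (fun k => PySem.List.pyGet? line k == some 1), p + 1 ≤ x := by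
        intro x hx
        have hx2 := List.mem_of_mem_filter hx
        rw [PySem.List.mem_pyRange_one] at hx2
        omega
      rw [pvStopFwd_cons _ _ _ hmin]
      rw [show |p + 1 - 1 - i| = p + 1 - i - 1 by rw [abs_of_nonneg (by omega)]; ring]
    · simp only [if_neg h1]
      refine ih (p + 1) (by omega) (by omega) (fun k hk0 hk1 hcell => ?_)
      by_cases hkp : k = p + 1
      · rw [hkp, hcv] at hcell
        exact h1 (Option.some.inj hcell)
      · exact hnw k hk0 (by omega) hcell

lemma leftEq (maze : List (List Int)) (i j : Int) (line : List Int)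
    (hline : ∀ c : Int, pvCell maze i c = PySem.List.pyGet? line c)
    (hj0 : 0 ≤ j) (hj : j < (line.length : Int)) :
    ∀ p : Nat, (p : Int) ≤ j →
      (∀ k : Int, (p : Int) ≤ k → k < j → pvCell maze i k ≠ some 1) →
      pvLoopLeft maze i j ((PySem.List.pyRange (-1) (p : Int) 1).reverse)
        = some [i, pvStopBack ((PySem.List.pyRange 0 j 1).filter (fun k => PySem.List.pyGet? line k == some 1)),
                |pvStopBack ((PySem.List.pyRange 0 j 1).filter (fun k => PySem.List.pyGet? line k == some 1)) - j|] := by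
  intro p
  induction p with
  | zero =>
    intro _ hnw
    have hw : (PySem.List.pyRange 0 j 1).filter (fun k => PySem.List.pyGet? line k == some 1) = [] :=
      filter_walls_nil line 0 j (fun k hk0 hkj h =>
        hnw k hk0 hkj ((hline k).symm ▸ h))
    rw [hw, pvStopBack_nil]
    simp only [Nat.cast_zero]
    rw [show PySem.List.pyRange (-1) 0 1 = [-1] by decide]
    simp only [List.reverse_cons, List.reverse_nil, List.nil_append, pvLoopLeft]
    rw [zero_sub, abs_neg, abs_of_nonneg hj0]
    simp
  | succ p ih =>
    intro hle hnw
    have hcast : ((p + 1 : Nat) : Int) = (p : Int) + 1 := by push_cast; ring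
    rw [hcast] at hle hnw ⊢
    rw [PySem.List.pyRange_one_succ_right (by omega : (-1 : Int) ≤ (p : Int)), List.reverse_append]
    simp only [List.reverse_cons, List.reverse_nil, List.nil_append, List.cons_append]
    obtain ⟨v, hv⟩ := line_some line p (by omega) (by omega)
    have hcv : pvCell maze i (p : Int) = some v := (hline p) ▸ hv
    simp only [pvLoopLeft]
    rw [if_neg (by omega : ¬ ((p : Int) = -1)), hcv]
    by_cases h1 : v = 1
    · subst h1
      simp only [reduceIte]
      have hs1 : PySem.List.pyRange 0 j 1
          = (PySem.List.pyRange 0 (p : Int) 1 ++ [(p : Int)]) ++ PySem.List.pyRange ((p : Int) + 1) j 1 := by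
        rw [← PySem.List.pyRange_one_succ_right (by omega : (0 : Int) ≤ (p : Int)),
            ← PySem.List.pyRange_one_append 0 ((p : Int) + 1) j (by omega) (by omega)]
      rw [hs1, List.filter_append, List.filter_append]
      have htail : (PySem.List.pyRange ((p : Int) + 1) j 1).filter (fun k => PySem.List.pyGet? line k == some 1) = [] :=
        filter_walls_nil line _ _ (fun k hk0 hkj h =>
          hnw k (by omega) hkj ((hline k).symm ▸ h))
      have hmid : ([(p : Int)]).filter (fun k => PySem.List.pyGet? line k == some 1) = [(p : Int)] := by
        simp [hv]
      rw [htail, hmid, List.append_nil]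
      have hws : ∀ x ∈ (PySem.List.pyRange 0 (p : Int) 1).filter (fun k => PySem.List.pyGet? line k == some 1), x ≤ (p : Int) := by
        intro x hx
        have hx2 := List.mem_of_mem_filter hx
        rw [PySem.List.mem_pyRange_one] at hx2
        omega
      rw [pvStopBack_append _ _ hws]
      rw [show |(p : Int) + 1 - j| = j - (p : Int) - 1 by rw [abs_of_nonpos (by omega)]; ring]
    · simp only [if_neg h1]
      refine ih (by omega) (fun k hk0 hkj hcell => ?_)
      by_cases hkp : k = (p : Int)
      · rw [hkp, hcv] at hcell
        exact h1 (Option.some.inj hcell)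
      · exact hnw k (by omega) hkj hcell

lemma rightEq (maze : List (List Int)) (i j : Int) (line : List Int)
    (hline : ∀ c : Int, pvCell maze i c = PySem.List.pyGet? line c)
    (hj0 : 0 ≤ j) :
    ∀ n : Nat, ∀ p : Int, j ≤ p → p + (n : Int) = (line.length : Int) - 1 →
      (∀ k : Int, j < k → k ≤ p → pvCell maze i k ≠ some 1) →
      pvLoopRight maze i j (line.length : Int) (PySem.List.pyRange (p + 1) ((line.length : Int) + 1) 1)
        = some [i, pvStopFwd (line.length : Int) ((PySem.List.pyRange (j + 1) ((line.length : Int)) 1).filter (fun k => PySem.List.pyGet? line k == some 1)),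
                |pvStopFwd (line.length : Int) ((PySem.List.pyRange (j + 1) ((line.length : Int)) 1).filter (fun k => PySem.List.pyGet? line k == some 1)) - j|] := by
  intro n
  induction n with
  | zero =>
    intro p hjp hpn hnw
    simp only [Nat.cast_zero, add_zero] at hpn
    have hw : (PySem.List.pyRange (j + 1) ((line.length : Int)) 1).filter (fun k => PySem.List.pyGet? line k == some 1) = [] :=
      filter_walls_nil line _ _ (fun k hk0 hki h =>
        hnw k (by omega) (by omega) ((hline k).symm ▸ h))
    rw [hw, pvStopFwd_nil]
    rw [PySem.List.pyRange_one_cons (by omega : p + 1 < (line.length : Int) + 1),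
        PySem.List.pyRange_one_eq_nil (by omega : (line.length : Int) + 1 ≤ p + 1 + 1)]
    simp only [pvLoopRight]
    rw [if_pos (by omega : p + 1 = (line.length : Int))]
    rw [show |(line.length : Int) - 1 - j| = (line.length : Int) - j - 1 by
      rw [abs_of_nonneg (by omega)]; ring]
  | succ n ih =>
    intro p hjp hpn hnw
    have hcast : ((n + 1 : Nat) : Int) = (n : Int) + 1 := by push_cast; ring
    rw [hcast] at hpn
    rw [PySem.List.pyRange_one_cons (by omega : p + 1 < (line.length : Int) + 1)]
    simp only [pvLoopRight]
    rw [if_neg (by omega : ¬ (p + 1 = (line.length : Int)))]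
    obtain ⟨v, hv⟩ := line_some line (p + 1) (by omega) (by omega)
    have hcv : pvCell maze i (p + 1) = some v := (hline (p + 1)) ▸ hv
    rw [hcv]
    by_cases h1 : v = 1
    · subst h1
      simp only [reduceIte]
      rw [PySem.List.pyRange_one_append (j + 1) (p + 1) ((line.length : Int)) (by omega) (by omega),
          List.filter_append]
      have h0 : (PySem.List.pyRange (j + 1) (p + 1) 1).filter (fun k => PySem.List.pyGet? line k == some 1) = [] :=
        filter_walls_nil line _ _ (fun k hk0 hki h =>
          hnw k (by omega) (by omega) ((hline k).symm ▸ h))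
      rw [h0, List.nil_append,
          PySem.List.pyRange_one_cons (by omega : p + 1 < (line.length : Int)),
          List.filter_cons_of_pos (by simp [hv])]
      have hmin : ∀ x ∈ (PySem.List.pyRange (p + 1 + 1) ((line.length : Int)) 1).filter (fun k => PySem.List.pyGet? line k == some 1), p + 1 ≤ x := by
        intro x hx
        have hx2 := List.mem_of_mem_filter hx
        rw [PySem.List.mem_pyRange_one] at hx2
        omega
      rw [pvStopFwd_cons _ _ _ hmin]
      rw [show |p + 1 - 1 - j| = p + 1 - j - 1 by rw [abs_of_nonneg (by omega)]; ring]
    · simp only [if_neg h1]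
      refine ih (p + 1) (by omega) (by omega) (fun k hk0 hk1 hcell => ?_)
      by_cases hkp : k = p + 1
      · rw [hkp, hcv] at hcell
        exact h1 (Option.some.inj hcell)
      · exact hnw k hk0 (by omega) hcell

-- ===== VERDICT (by name: the statement is the Claim_ definition above) =====
theorem destinationAndDistance_spec : Claim_equal_destinationAndDistance := by
  intro maze i j direction _ hpre
  unfold Spec_destinationAndDistance
  by_cases h0 : direction = 0
  · subst h0
    obtain ⟨hne, rect, hi0, hi, hj0, hj⟩ := hpre (Or.inl rfl)
    have hmapM : maze.mapM (fun row => PySem.List.pyGet? row j)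
        = some (maze.map (fun row => PySem.List.pyGetD row j 0)) :=
      mapM_some _ _ maze (fun row hrow => row_get row j hj0 (by rw [rect row hrow]; exact hj))
    have hlenc : (maze.map (fun row => PySem.List.pyGetD row j 0)).length = maze.length := by simp
    have hlinec := col_spec maze j (maze.headD []).length rect hj0 hj
    have hA := upEq maze i j (maze.map (fun row => PySem.List.pyGetD row j 0)) hlenc hlinec hi0 hi
      i.toNat (by omega) (fun k hk0 hk1 => absurd hk1 (by omega))
    rw [show ((i.toNat : Nat) : Int) = i from by omega] at hA
    simp only [destinationAndDistance, reduceIte, hA]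
    simp [destinationAndDistance_alt, hmapM]
  · by_cases h1 : direction = 1
    · subst h1
      obtain ⟨hne, rect, hi0, hi, hj0, hj⟩ := hpre (Or.inr (Or.inl rfl))
      have hmapM : maze.mapM (fun row => PySem.List.pyGet? row j)
          = some (maze.map (fun row => PySem.List.pyGetD row j 0)) :=
        mapM_some _ _ maze (fun row hrow => row_get row j hj0 (by rw [rect row hrow]; exact hj))
      have hlenc : (maze.map (fun row => PySem.List.pyGetD row j 0)).length = maze.length := by simp
      have hlinec := col_spec maze j (maze.headD []).length rect hj0 hj
      have hA := downEq maze i j (maze.map (fun row => PySem.List.pyGetD row j 0)) hlenc hlinec hi0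
        ((maze.length : Int) - 1 - i).toNat i (le_refl i) (by omega)
        (fun k hk0 hk1 => absurd hk0 (by omega))
      simp only [destinationAndDistance, reduceIte, hA]
      simp [destinationAndDistance_alt, hmapM]
    · by_cases h2 : direction = 2
      · subst h2
        obtain ⟨hne, rect, hi0, hi, hj0, hj⟩ := hpre (Or.inr (Or.inr (Or.inl rfl)))
        have hrowN : i.toNat < maze.length := by omega
        have hrow : PySem.List.pyGet? maze i = some maze[i.toNat] := by
          rw [PySem.List.pyGet?_of_nonneg maze hi0, List.getElem?_eq_getElem hrowN]
        have hlinerow : ∀ c : Int, pvCell maze i c = PySem.List.pyGet? maze[i.toNat] c := by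
          intro c; unfold pvCell; rw [hrow]
        have hrlen : (maze[i.toNat]).length = (maze.headD []).length := rect _ (List.getElem_mem hrowN)
        have hj' : j < ((maze[i.toNat]).length : Int) := by rw [hrlen]; exact hj
        have hA := leftEq maze i j maze[i.toNat] hlinerow hj0 hj'
          j.toNat (by omega) (fun k hk0 hk1 => absurd hk1 (by omega))
        rw [show ((j.toNat : Nat) : Int) = j from by omega] at hA
        simp only [destinationAndDistance, reduceIte, hA]
        simp [destinationAndDistance_alt, hrow]
      · by_cases h3 : direction = 3
        · subst h3
          obtain ⟨hne, rect, hi0, hi, hj0, hj⟩ := hpre (Or.inr (Or.inr (Or.inr rfl)))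
          have hrowN : i.toNat < maze.length := by omega
          have hrow : PySem.List.pyGet? maze i = some maze[i.toNat] := by
            rw [PySem.List.pyGet?_of_nonneg maze hi0, List.getElem?_eq_getElem hrowN]
          have hlinerow : ∀ c : Int, pvCell maze i c = PySem.List.pyGet? maze[i.toNat] c := by
            intro c; unfold pvCell; rw [hrow]
          have hrlen : (maze[i.toNat]).length = (maze.headD []).length := rect _ (List.getElem_mem hrowN)
          have hget0 : PySem.List.pyGet? maze 0 = some (maze.headD []) := by
            cases maze with
            | nil => exact absurd rfl hne
            | cons r rest => simp
          have hA := rightEq maze i j maze[i.toNat] hlinerow hj0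
            (((maze[i.toNat]).length : Int) - 1 - j).toNat j (le_refl j)
            (by rw [hrlen]; omega) (fun k hk0 hk1 => absurd hk0 (by omega))
          simp only [destinationAndDistance, reduceIte, hget0]
          rw [show ((maze.headD []).length : Int) = ((maze[i.toNat]).length : Int) from by rw [hrlen]]
          rw [hA]
          simp [destinationAndDistance_alt, hrow]
        · simp [destinationAndDistance, destinationAndDistance_alt, h0, h1, h2, h3]
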